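-- pv_equiv track=rewrite | github.com/slicer2/gf | primitive.py | enumerateMonicPoly
-- ===== SOURCE A (Python) =====
-- def enumerateMonicPoly(p, n):
--     """ Enumerate all monic polynomials """
--     mSet = []
--     pSet = [[i] for i in range(p)]
--
--     for _n in range(2, n+1):
--         _pSet = []
--         for j in range(0, p):
--             _pSet.extend([[j] + pSet[k] for k in range(len(pSet))])
--
--         _mSet = []
--         _mSet.extend([[1] + pSet[k] for k in range(len(pSet))])
--
--         mSet.extend(_mSet)
--
--         pSet = _pSet
--
--     return mSet
-- ===== SOURCE B (Python) =====
-- def enumerateMonicPoly(p, n):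
--     """ Enumerate all monic polynomials """
--     if p <= 0:
--         return []
--     out = []
--     for d in range(1, n):
--         for idx in range(p ** d):
--             coeffs = []
--             x = idx
--             for _ in range(d):
--                 coeffs.append(x % p)
--                 x //= p
--             coeffs.reverse()
--             out.append([1] + coeffs)
--     return out
-- ===== Notes on version B (the rewrite author's own statement) =====
-- stated objective: alternative
-- what changed: B enumerates each degree independently by decoding a running index 0..p^d-1 into its base-p digit list, instead of A's accumulator-threaded Cartesian buildup that rebuilds and carries the previous degree's pSet (and computes a dead final _pSet).
import Mathlib
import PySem

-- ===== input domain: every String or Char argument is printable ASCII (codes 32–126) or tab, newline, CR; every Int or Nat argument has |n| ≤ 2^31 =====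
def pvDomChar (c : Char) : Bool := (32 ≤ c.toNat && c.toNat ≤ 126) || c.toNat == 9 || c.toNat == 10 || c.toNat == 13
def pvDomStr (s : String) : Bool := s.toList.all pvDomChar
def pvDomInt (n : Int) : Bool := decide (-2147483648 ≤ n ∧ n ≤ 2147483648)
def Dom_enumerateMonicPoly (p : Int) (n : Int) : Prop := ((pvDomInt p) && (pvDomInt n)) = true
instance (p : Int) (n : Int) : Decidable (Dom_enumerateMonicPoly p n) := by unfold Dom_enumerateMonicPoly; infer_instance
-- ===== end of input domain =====

-- B replaces A's accumulator-threaded layer-by-layer Cartesian buildup with independent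
-- per-degree base-p digit decoding of a running index (objective: alternative algorithm).

-- ===== PORT A =====
def enumerateMonicPoly (p : Int) (n : Int) : List (List Int) :=
  let pSet0 := (PySem.List.pyRange 0 p 1).map (fun i => [i])
  let st := (PySem.List.pyRange 2 (n + 1) 1).foldl
    (fun (st : List (List Int) × List (List Int)) _n =>
      let mSet := st.1
      let pSet := st.2
      let _pSet := (PySem.List.pyRange 0 p 1).foldl
        (fun acc j =>
          acc ++ (PySem.List.pyRange 0 (pSet.length : Int) 1).map
            (fun k => j :: PySem.List.pyGetD pSet k []))
        []
      let _mSet := ([] : List (List Int)) ++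
        (PySem.List.pyRange 0 (pSet.length : Int) 1).map
          (fun k => (1 : Int) :: PySem.List.pyGetD pSet k [])
      (mSet ++ _mSet, _pSet))
    ([], pSet0)
  st.1

-- ===== PORT B =====
def enumerateMonicPoly_alt (p : Int) (n : Int) : List (List Int) :=
  if p ≤ 0 then []
  else
    (PySem.List.pyRange 1 n 1).foldl
      (fun out d =>
        (PySem.List.pyRange 0 (p ^ d.toNat) 1).foldl
          (fun out idx =>
            let cx := (PySem.List.pyRange 0 d 1).foldl
              (fun (s : List Int × Int) _ =>
                (s.1 ++ [PySem.Int.mod s.2 p], PySem.Int.floordiv s.2 p))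
              ([], idx)
            out ++ [(1 : Int) :: cx.1.reverse])
          out)
      []

-- ===== PRECONDITION & SPEC =====
def Spec_enumerateMonicPoly (p : Int) (n : Int) (out : List (List Int)) : Prop := out = enumerateMonicPoly_alt p n
instance (p : Int) (n : Int) (out : List (List Int)) : Decidable (Spec_enumerateMonicPoly p n out) := by unfold Spec_enumerateMonicPoly; infer_instance

-- ===== CLAIM (what is proved, stated in full; the proofs are below) =====
def Claim_equal_enumerateMonicPoly : Prop := ∀ (p : Int) (n : Int), Dom_enumerateMonicPoly p n → Spec_enumerateMonicPoly p n (enumerateMonicPoly p n)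

-- ===== LEMMAS AND PROOFS =====

-- all length-d coefficient tuples over {0,..,p-1} in lexicographic order (first coord slowest)
def pvT (p : Int) : Nat → List (List Int)
  | 0 => [[]]
  | d + 1 => (PySem.List.pyRange 0 p 1).flatMap (fun j => (pvT p d).map (fun t => j :: t))

-- least-significant-digit-first base-p digit list of x, of length d
def pvLsb (p : Int) : Nat → Int → List Int
  | 0, _ => []
  | d + 1, x => PySem.Int.mod x p :: pvLsb p d (PySem.Int.floordiv x p)

theorem pvT_succ (p : Int) (d : Nat) :
    pvT p (d + 1) = (PySem.List.pyRange 0 p 1).flatMap (fun j => (pvT p d).map (fun t => j :: t)) := rfl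

-- A's inner loop body, simplified
theorem pvA_body (p : Int) (ps : List (List Int)) (acc : List (List Int)) :
    (PySem.List.pyRange 0 p 1).foldl
      (fun a j => a ++ (PySem.List.pyRange 0 (ps.length : Int) 1).map
        (fun k => j :: PySem.List.pyGetD ps k [])) acc
    = acc ++ (PySem.List.pyRange 0 p 1).flatMap (fun j => ps.map (fun t => j :: t)) := by
  have h : ∀ j : Int,
      (PySem.List.pyRange 0 (ps.length : Int) 1).map (fun k => j :: PySem.List.pyGetD ps k [])
      = ps.map (fun t => j :: t) := by
    intro j
    have h2 := PySem.List.map_pyGetD_pyRange_zero' (xs := ps) (d := ([] : List Int))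
    calc (PySem.List.pyRange 0 (ps.length : Int) 1).map (fun k => j :: PySem.List.pyGetD ps k [])
        = ((PySem.List.pyRange 0 (ps.length : Int) 1).map
            (fun k => PySem.List.pyGetD ps k [])).map (fun t => j :: t) := by
          rw [List.map_map]; rfl
      _ = ps.map (fun t => j :: t) := by rw [h2]
  simp only [h]
  exact PySem.List.foldl_append_eq_flatMap _ _ _

theorem pvMap_pyGetD (ps : List (List Int)) :
    (PySem.List.pyRange 0 (ps.length : Int) 1).map
      (fun k => (1 : Int) :: PySem.List.pyGetD ps k [])
    = ps.map (fun t => (1 : Int) :: t) := by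
  calc (PySem.List.pyRange 0 (ps.length : Int) 1).map (fun k => (1 : Int) :: PySem.List.pyGetD ps k [])
      = ((PySem.List.pyRange 0 (ps.length : Int) 1).map
          (fun k => PySem.List.pyGetD ps k [])).map (fun t => (1 : Int) :: t) := by
        rw [List.map_map]; rfl
    _ = ps.map (fun t => (1 : Int) :: t) := by
        rw [PySem.List.map_pyGetD_pyRange_zero' (xs := ps) (d := ([] : List Int))]

theorem pvFlatMap_congr {α β : Type} (l : List α) (f g : α → List β)
    (h : ∀ a ∈ l, f a = g a) : l.flatMap f = l.flatMap g := by
  induction l with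
  | nil => rfl
  | cons a l ih =>
    simp only [List.flatMap_cons]
    rw [h a (by simp), ih (fun a ha => h a (by simp [ha]))]

-- A's outer loop: invariant over an arbitrary index list
theorem pvA_loop (p : Int) (L : List Int) (ms : List (List Int)) (d : Nat) :
    (L.foldl
      (fun (st : List (List Int) × List (List Int)) _n =>
        ( st.1 ++ (PySem.List.pyRange 0 (st.2.length : Int) 1).map
              (fun k => (1 : Int) :: PySem.List.pyGetD st.2 k []),
          (PySem.List.pyRange 0 p 1).foldl
            (fun acc j => acc ++ (PySem.List.pyRange 0 (st.2.length : Int) 1).map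
              (fun k => j :: PySem.List.pyGetD st.2 k [])) [] ))
      (ms, pvT p d))
    = (ms ++ (List.range L.length).flatMap (fun i => (pvT p (d + i)).map (fun t => (1 : Int) :: t)),
       pvT p (d + L.length)) := by
  induction L generalizing ms d with
  | nil => simp
  | cons a L ih =>
    simp only [List.foldl_cons]
    rw [pvA_body p (pvT p d), pvMap_pyGetD (pvT p d)]
    simp only [List.nil_append]
    rw [show ((PySem.List.pyRange 0 p 1).flatMap fun j => (pvT p d).map (fun t => j :: t))
          = pvT p (d + 1) from (pvT_succ p d).symm]
    rw [ih (ms ++ (pvT p d).map (fun t => (1 : Int) :: t)) (d + 1)]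
    have harg : ∀ i : Nat, d + 1 + i = d + (i + 1) := by omega
    rw [Prod.mk.injEq]
    constructor
    · rw [List.length_cons, List.range_succ_eq_map, List.flatMap_cons, List.flatMap_map]
      simp only [Nat.add_zero, List.append_assoc]
      congr 1
      congr 1
      exact pvFlatMap_congr _ _ _ (fun i _ => by rw [harg i])
    · rw [List.length_cons, show d + 1 + L.length = d + (L.length + 1) from by omega]

theorem pvA_zero (p : Int) (hp : p ≤ 0) (L : List Int) :
    (L.foldl
      (fun (st : List (List Int) × List (List Int)) _n =>
        ( st.1 ++ (PySem.List.pyRange 0 (st.2.length : Int) 1).map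
              (fun k => (1 : Int) :: PySem.List.pyGetD st.2 k []),
          (PySem.List.pyRange 0 p 1).foldl
            (fun acc j => acc ++ (PySem.List.pyRange 0 (st.2.length : Int) 1).map
              (fun k => j :: PySem.List.pyGetD st.2 k [])) [] ))
      (([] : List (List Int)),
       (PySem.List.pyRange 0 p 1).map (fun i => [i]))) = ([], []) := by
  rw [show (PySem.List.pyRange 0 p 1).map (fun i : Int => [i]) = ([] : List (List Int)) from by
    rw [PySem.List.pyRange_one_eq_nil (by omega : p ≤ (0:Int))]; rfl]
  induction L with
  | nil => rfl
  | cons a L ih =>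
    rw [List.foldl_cons]
    convert ih using 2
    all_goals simp [PySem.List.pyRange_one_eq_nil (show p ≤ (0:Int) by omega),
            PySem.List.pyRange_one_eq_nil (le_refl (0:Int))]

-- base-p digit peeling of a leading-digit split
theorem pvLsb_split (p : Int) (hp : 0 < p) (d : Nat) :
    ∀ j i : Int, 0 ≤ j → j < p → 0 ≤ i → i < p ^ d →
    pvLsb p (d + 1) (j * p ^ d + i) = pvLsb p d i ++ [j] := by
  induction d with
  | zero =>
    intro j i hj0 hjp hi0 hip
    have hp0 : (p:Int) ^ 0 = 1 := pow_zero p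
    have hi : i = 0 := by omega
    subst hi
    simp only [pvLsb, pow_zero, mul_one, add_zero, List.nil_append]
    rw [PySem.Int.mod_eq_emod_of_pos hp]
    rw [Int.emod_eq_of_lt hj0 hjp]
  | succ d ih =>
    intro j i hj0 hjp hi0 hip
    have hpow : (0:Int) < p ^ d := pow_pos hp d
    have hps : (p:Int) ^ (d + 1) = p ^ d * p := pow_succ p d
    have hmod : PySem.Int.mod (j * p ^ (d + 1) + i) p = PySem.Int.mod i p := by
      rw [PySem.Int.mod_eq_emod_of_pos hp, PySem.Int.mod_eq_emod_of_pos hp]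
      rw [show j * p ^ (d + 1) + i = i + (j * p ^ d) * p from by ring,
          Int.add_mul_emod_self_right]
    have hdiv : PySem.Int.floordiv (j * p ^ (d + 1) + i) p = j * p ^ d + PySem.Int.floordiv i p := by
      rw [PySem.Int.floordiv_eq_ediv_of_pos hp, PySem.Int.floordiv_eq_ediv_of_pos hp]
      rw [show j * p ^ (d + 1) + i = i + (j * p ^ d) * p from by ring,
          Int.add_mul_ediv_right _ _ (by omega : p ≠ 0), Int.add_comm]
    have hq0 : 0 ≤ PySem.Int.floordiv i p := by
      rw [PySem.Int.floordiv_eq_ediv_of_pos hp]; exact Int.ediv_nonneg hi0 (by omega)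
    have hqlt : PySem.Int.floordiv i p < p ^ d := by
      rw [PySem.Int.floordiv_eq_ediv_of_pos hp]
      rw [Int.ediv_lt_iff_lt_mul hp]
      omega
    rw [show pvLsb p (d + 1 + 1) (j * p ^ (d + 1) + i)
          = PySem.Int.mod (j * p ^ (d + 1) + i) p
            :: pvLsb p (d + 1) (PySem.Int.floordiv (j * p ^ (d + 1) + i) p) from rfl]
    rw [hmod, hdiv, ih j (PySem.Int.floordiv i p) hj0 hjp hq0 hqlt]
    rw [show pvLsb p (d + 1) i
          = PySem.Int.mod i p :: pvLsb p d (PySem.Int.floordiv i p) from rfl]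
    simp

-- decomposing range(p^(d+1)) by the leading digit
theorem pvRange_split (p : Int) (hp : 0 < p) (d : Nat) :
    PySem.List.pyRange 0 (p ^ (d + 1)) 1
    = (PySem.List.pyRange 0 p 1).flatMap
        (fun j => (PySem.List.pyRange 0 (p ^ d) 1).map (fun i => j * p ^ d + i)) := by
  have hpow : (0:Int) < p ^ d := pow_pos hp d
  have key : ∀ m : Nat, (m : Int) ≤ p →
      PySem.List.pyRange 0 ((m : Int) * p ^ d) 1
      = (PySem.List.pyRange 0 (m : Int) 1).flatMap
          (fun j => (PySem.List.pyRange 0 (p ^ d) 1).map (fun i => j * p ^ d + i)) := by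
    intro m
    induction m with
    | zero => intro _; simp [PySem.List.pyRange_one_eq_nil]
    | succ m ih =>
      intro hm
      push_cast
      have hm' : (m : Int) ≤ p := by push_cast at hm; omega
      have h1 : (0:Int) ≤ (m : Int) * p ^ d := by positivity
      have h2 : (m : Int) * p ^ d ≤ ((m : Int) + 1) * p ^ d := by nlinarith
      rw [PySem.List.pyRange_one_append 0 ((m : Int) * p ^ d) (((m : Int) + 1) * p ^ d) h1 h2]
      rw [PySem.List.pyRange_one_succ_right (by positivity : (0:Int) ≤ (m:Int))]
      rw [List.flatMap_append, ← ih hm']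
      congr 1
      simp only [List.flatMap_cons, List.flatMap_nil, List.append_nil]
      rw [PySem.List.pyRange_one 0 (p ^ d),
          PySem.List.pyRange_one ((m : Int) * p ^ d) (((m : Int) + 1) * p ^ d)]
      rw [List.map_map]
      rw [show (((m : Int) + 1) * p ^ d - (m : Int) * p ^ d) = p ^ d from by ring]
      simp only [sub_zero]
      apply List.map_congr_left
      intro k _
      simp only [Function.comp_apply]
      ring
  have hfin : p ^ (d + 1) = (p.toNat : Int) * p ^ d := by
    rw [Int.toNat_of_nonneg (by omega)]; ring
  rw [hfin, key p.toNat (by rw [Int.toNat_of_nonneg (by omega)])]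
  rw [Int.toNat_of_nonneg (by omega)]

-- per-degree enumeration: decoding all indices gives exactly pvT
theorem pvB_degree (p : Int) (hp : 0 < p) (d : Nat) :
    (PySem.List.pyRange 0 (p ^ d) 1).map (fun idx => (pvLsb p d idx).reverse) = pvT p d := by
  induction d with
  | zero =>
    simp [pvT, pvLsb]
  | succ d ih =>
    rw [pvRange_split p hp d, pvT_succ, List.map_flatMap]
    apply pvFlatMap_congr
    intro j hj
    rw [PySem.List.mem_pyRange_one] at hj
    rw [List.map_map, ← ih, List.map_map]
    apply List.map_congr_left
    intro i hi
    rw [PySem.List.mem_pyRange_one] at hi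
    simp only [Function.comp_apply]
    rw [pvLsb_split p hp d j i hj.1 hj.2 hi.1 hi.2]
    simp

theorem pvB_inner (p : Int) (L : List Int) (acc : List Int) (x : Int) :
    (L.foldl
      (fun (s : List Int × Int) _ =>
        (s.1 ++ [PySem.Int.mod s.2 p], PySem.Int.floordiv s.2 p))
      (acc, x)).1 = acc ++ pvLsb p L.length x := by
  induction L generalizing acc x with
  | nil => simp [pvLsb]
  | cons a L ih =>
    simp only [List.foldl_cons, List.length_cons]
    rw [ih]
    simp [pvLsb]

theorem pvT_one (p : Int) : pvT p 1 = (PySem.List.pyRange 0 p 1).map (fun i => [i]) := by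
  simp only [pvT]
  exact (List.map_eq_flatMap).symm

-- ===== VERDICT (by name: the statement is the Claim_ definition above) =====
theorem enumerateMonicPoly_spec : Claim_equal_enumerateMonicPoly := by
  intro p n _
  unfold Spec_enumerateMonicPoly enumerateMonicPoly enumerateMonicPoly_alt
  by_cases hp : p ≤ 0
  · simp only [if_pos hp, List.nil_append]
    rw [pvA_zero p hp]
  · simp only [if_neg hp]
    have hp' : 0 < p := by omega
    -- A side
    simp only [List.nil_append]
    rw [← pvT_one p, pvA_loop p (PySem.List.pyRange 2 (n + 1) 1) [] 1]
    simp only [List.nil_append, PySem.List.length_pyRange_one]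
    -- B side
    have hinner : ∀ (out : List (List Int)) (d : Int), 0 < d →
        (PySem.List.pyRange 0 (p ^ d.toNat) 1).foldl
          (fun out idx =>
            let cx := (PySem.List.pyRange 0 d 1).foldl
              (fun (s : List Int × Int) _ =>
                (s.1 ++ [PySem.Int.mod s.2 p], PySem.Int.floordiv s.2 p))
              ([], idx)
            out ++ [(1 : Int) :: cx.1.reverse]) out
        = out ++ ((pvT p d.toNat).map (fun t => (1 : Int) :: t)) := by
      intro out d hd
      have hb : ∀ (out : List (List Int)) (idx : Int),
          (fun out idx =>
            let cx := (PySem.List.pyRange 0 d 1).foldl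
              (fun (s : List Int × Int) _ =>
                (s.1 ++ [PySem.Int.mod s.2 p], PySem.Int.floordiv s.2 p))
              ([], idx)
            out ++ [(1 : Int) :: cx.1.reverse]) out idx
          = out ++ [(1 : Int) :: (pvLsb p d.toNat idx).reverse] := by
        intro out idx
        simp only []
        rw [pvB_inner p (PySem.List.pyRange 0 d 1) [] idx]
        rw [PySem.List.length_pyRange_one]
        simp
      simp only [hb]
      rw [PySem.List.foldl_append_singleton_eq_map]
      rw [show (fun idx => (1 : Int) :: (pvLsb p d.toNat idx).reverse)
            = (fun t => (1 : Int) :: t) ∘ (fun idx => (pvLsb p d.toNat idx).reverse) from rfl]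
      rw [← List.map_map, pvB_degree p hp' d.toNat]
    have hfold : ∀ (L : List Int), (∀ d ∈ L, 0 < d) → ∀ (out : List (List Int)),
        L.foldl
          (fun out d =>
            (PySem.List.pyRange 0 (p ^ d.toNat) 1).foldl
              (fun out idx =>
                let cx := (PySem.List.pyRange 0 d 1).foldl
                  (fun (s : List Int × Int) _ =>
                    (s.1 ++ [PySem.Int.mod s.2 p], PySem.Int.floordiv s.2 p))
                  ([], idx)
                out ++ [(1 : Int) :: cx.1.reverse])
              out) out
        = out ++ L.flatMap (fun d => (pvT p d.toNat).map (fun t => (1 : Int) :: t)) := by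
      intro L
      induction L with
      | nil => intro _ out; simp
      | cons a L ih =>
        intro hmem out
        simp only [List.foldl_cons, List.flatMap_cons]
        rw [hinner out a (hmem a (by simp)), ih (fun d hd => hmem d (by simp [hd]))]
        rw [List.append_assoc]
    rw [hfold (PySem.List.pyRange 1 n 1)
        (fun d hd => by rw [PySem.List.mem_pyRange_one] at hd; omega) []]
    simp only [List.nil_append]
    rw [show (n + 1 - 2 : Int) = n - 1 from by ring]
    rw [PySem.List.pyRange_one 1 n, List.flatMap_map]
    apply pvFlatMap_congr
    intro k _
    congr 2
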